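-- pv_equiv track=rewrite | github.com/dalsat/advent-of-code | 2022/adventofcode/day03.py | part2
-- ===== SOURCE A (Python) =====
-- import functools
--
-- def score_for(item: str) -> int:
--     code = ord(item)
--     if code >= 97:
--         return code - 96
--     else:
--         return code - 38  # 65 - 27 = 38
--
-- def part2(data):
--
--     def parse_input(data):
--         elves = iter(filter(lambda x: x, data))
--         try:
--             while elves:
--                 yield next(elves), next(elves), next(elves)
--         except StopIteration:
--             pass
--
--     def find_common(group):
--         common_item = functools.reduce(lambda a, b: set(a).intersection(set(b)), group)
--         assert len(common_item) == 1
--         return list(common_item)[0]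
--
--     return sum(score_for(find_common(item)) for item in parse_input(data))
-- ===== SOURCE B (Python) =====
-- def score_for(item: str) -> int:
--     code = ord(item)
--     if code >= 97:
--         return code - 96
--     else:
--         return code - 38
--
--
-- def part2(data):
--     lines = [x for x in data if x]
--     total = 0
--     for i in range(len(lines) // 3):
--         a, b, c = lines[3 * i], lines[3 * i + 1], lines[3 * i + 2]
--         total += score_for(next(ch for ch in a if ch in b and ch in c))
--     return total
-- ===== Notes on version B (the rewrite author's own statement) =====
-- stated objective: simpler
-- what changed: Replaces A's generator/next() grouping and functools.reduce of set intersections (plus assert and list(...)[0]) by a plain index-stepped loop over len(lines)//3 groups that scans the first line for the first character contained in the other two.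
-- outside the precondition, e.g. on part2(['ab', 'ab', 'ab']): A raises AssertionError, B returns 1; on part2(['ab', 'cd', 'ef']): A raises AssertionError, B raises StopIteration
import Mathlib
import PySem

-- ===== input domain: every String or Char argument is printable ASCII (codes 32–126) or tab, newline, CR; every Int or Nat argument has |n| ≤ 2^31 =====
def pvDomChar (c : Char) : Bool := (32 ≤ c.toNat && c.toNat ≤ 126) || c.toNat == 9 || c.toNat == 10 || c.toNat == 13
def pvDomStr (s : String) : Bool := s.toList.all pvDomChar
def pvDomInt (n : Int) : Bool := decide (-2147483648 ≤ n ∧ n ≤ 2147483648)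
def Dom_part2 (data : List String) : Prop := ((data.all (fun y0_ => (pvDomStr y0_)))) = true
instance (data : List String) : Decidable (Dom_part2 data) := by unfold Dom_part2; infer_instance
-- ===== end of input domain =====

-- B replaces A's iterator/reduce-of-set-intersections pipeline by an index-stepped loop that scans the
-- first line of each group for the first character contained in the other two (objective: simpler).

-- ===== PORT A =====
-- score_for (present verbatim in both Python files)
def scoreFor (item : Char) : Int :=
  let code : Int := item.toNat
  if code ≥ 97 then code - 96 else code - 38

-- find_common: functools.reduce(set-intersection) over the 3-tuple, then list(common_item)[0]
-- (headD is the total form of [0]; Pre_ excludes the inputs where the assert / the indexing would fail)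
def findCommon (g : String × String × String) : List Char :=
  PySem.Set.inter
    (PySem.Set.inter (PySem.Set.ofList g.1.toList) (PySem.Set.ofList g.2.1.toList))
    (PySem.Set.ofList g.2.2.toList)

-- parse_input + the summing generator: take three filtered lines at a time, drop a trailing incomplete group
def part2Go : List String → Int
  | a :: b :: c :: rest => scoreFor ((findCommon (a, b, c)).headD ' ') + part2Go rest
  | _ => 0

def part2 (data : List String) : Int :=
  part2Go (data.filter (fun x => !(x == "")))

-- ===== PORT B =====
def part2_alt (data : List String) : Int :=
  let lines := data.filter (fun x => !(x == ""))
  (PySem.List.pyRange 0 (PySem.Int.floordiv (lines.length : Int) 3) 1).foldl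
    (fun total i =>
      let a := PySem.List.pyGetD lines (3 * i) ""
      let b := PySem.List.pyGetD lines (3 * i + 1) ""
      let c := PySem.List.pyGetD lines (3 * i + 2) ""
      -- next(ch for ch in a if ch in b and ch in c); Pre_ excludes the StopIteration case
      total + scoreFor ((a.toList.find? (fun ch =>
          b.toList.contains ch && c.toList.contains ch)).getD ' '))
    0

-- ===== PRECONDITION & SPEC =====
-- Pre_ excludes exactly the inputs where A raises: some complete 3-line group whose number of distinct
-- common characters is not 1 (AssertionError from 'assert len(common_item) == 1').
def Pre_part2 (data : List String) : Prop :=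
  let lines := data.filter (fun x => !(x == ""))
  ∀ i, i < lines.length / 3 →
    (PySem.List.dedup ((lines.getD (3 * i) "").toList.filter (fun ch =>
        (lines.getD (3 * i + 1) "").toList.contains ch &&
        (lines.getD (3 * i + 2) "").toList.contains ch))).length = 1

instance (data : List String) : Decidable (Pre_part2 data) := by
  unfold Pre_part2; infer_instance

def pvWitness_part2 : List String := ["ab", "bc", "cb", "", "xy"]

def Spec_part2 (data : List String) (out : Int) : Prop := out = part2_alt data
instance (data : List String) (out : Int) : Decidable (Spec_part2 data out) := by unfold Spec_part2; infer_instance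

-- ===== CLAIM (what is proved, stated in full; the proofs are below) =====
def Claim_equal_part2 : Prop := ∀ (data : List String), Dom_part2 data → Pre_part2 data → Spec_part2 data (part2 data)

-- ===== LEMMAS AND PROOFS =====

-- the per-group membership test both sides use
def commonP (b c : String) (ch : Char) : Bool :=
  b.toList.contains ch && c.toList.contains ch

-- B's value of one group
def groupVal (a b c : String) : Int :=
  scoreFor ((a.toList.find? (commonP b c)).getD ' ')

lemma findCommon_eq (a b c : String) :
    findCommon (a, b, c) = (PySem.List.dedup a.toList).filter (commonP b c) := by
  unfold findCommon PySem.Set.inter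
  rw [List.filter_filter, ← PySem.List.dedup_eq_ofList]
  apply List.filter_congr
  intro x _
  simp [commonP, PySem.Set.mem_ofList, Bool.and_comm]

-- the first match of a predicate is unchanged by first-occurrence dedup
lemma head?_filter_dedup (p : Char → Bool) (xs : List Char) :
    ((PySem.List.dedup xs).filter p).head? = (xs.filter p).head? := by
  induction xs with
  | nil => rfl
  | cons x xs ih =>
    simp only [PySem.List.dedup_eq_ofList] at *
    rw [PySem.Set.ofList_cons]
    by_cases hp : p x
    · simp [hp]
    · simp only [List.filter_cons, hp, Bool.false_eq_true, if_false, ← ih]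
      unfold PySem.Set.discard
      rw [List.filter_filter]
      congr 1
      apply List.filter_congr
      intro y _
      by_cases hyx : y = x
      · subst hyx; simp [hp]
      · simp [hyx]

-- the two per-group values coincide on every group
lemma group_eq (a b c : String) :
    scoreFor ((findCommon (a, b, c)).headD ' ') = groupVal a b c := by
  rw [findCommon_eq, groupVal, List.headD_eq_head?_getD, head?_filter_dedup,
    List.head?_filter]

-- the index-stepped sum over complete groups equals A's three-at-a-time recursion
lemma sum_eq_go (lines : List String) :
    ((List.range (lines.length / 3)).map (fun k =>
      groupVal (lines.getD (3 * k) "") (lines.getD (3 * k + 1) "") (lines.getD (3 * k + 2) ""))).sum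
    = part2Go lines := by
  induction lines using part2Go.induct with
  | case1 a b c rest ih =>
    have hlen : (a :: b :: c :: rest).length / 3 = rest.length / 3 + 1 := by
      simp [List.length_cons]; omega
    rw [hlen, List.range_succ_eq_map]
    simp only [List.map_cons, List.map_map, List.sum_cons, part2Go]
    have hmap : (List.map ((fun k =>
        groupVal ((a::b::c::rest).getD (3 * k) "") ((a::b::c::rest).getD (3 * k + 1) "")
           ((a::b::c::rest).getD (3 * k + 2) "")) ∘ Nat.succ) (List.range (rest.length / 3))).sum
        = part2Go rest := by
      rw [← ih]
      refine congrArg List.sum (List.map_congr_left ?_)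
      intro k _
      have h0 : 3 * (Nat.succ k) = 3 * k + 1 + 1 + 1 := by omega
      simp only [Function.comp_apply, h0, List.getD_cons_succ]
    rw [hmap, group_eq]
    simp [List.getD]
  | case2 ls h =>
    match ls, h with
    | [], _ => simp [part2Go]
    | [a], _ => simp [part2Go]
    | [a, b], _ => simp [part2Go]
    | a :: b :: c :: rest, h => exact absurd rfl (h a b c rest)

-- ===== VERDICT (by name: the statement is the Claim_ definition above) =====
theorem part2_spec : Claim_equal_part2 := by
  intro data _ _
  unfold Spec_part2 part2 part2_alt
  set lines := data.filter (fun x => !(x == "")) with hl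
  have hfd : PySem.Int.floordiv (lines.length : Int) 3 = ((lines.length / 3 : Nat) : Int) := by
    exact_mod_cast PySem.Int.floordiv_natCast lines.length 3
  simp only [hfd, PySem.List.pyRange_zero_natCast, List.foldl_map, PySem.List.foldl_add,
    zero_add]
  rw [← sum_eq_go lines]
  refine congrArg List.sum (List.map_congr_left ?_)
  intro k _
  have c0 : ((3 : Int) * (k : Nat)) = ((3 * k : Nat) : Int) := by push_cast; ring
  have c1 : (((3 * k : Nat) : Int) + 1) = ((3 * k + 1 : Nat) : Int) := by push_cast; ring
  have c2 : (((3 * k : Nat) : Int) + 2) = ((3 * k + 2 : Nat) : Int) := by push_cast; ring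
  simp only [c0, c1, c2, PySem.List.pyGetD_natCast]
  unfold groupVal commonP
  simp
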